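-- pv_equiv track=rewrite | github.com/owyaggy/P01 | app/api.py | minute_forecast
-- ===== SOURCE A (Python) =====
-- def minute_forecast(minutes):
--     """Helper minutely forecast data analysis function for weather api"""
--     minute_start = -1
--     minute_end = -1
--     for minute in range(len(minutes)):
--         if minutes[minute]['precipitation'] == 0:
--             if minute_start != -1:
--                 minute_end = minute
--         else:
--             if minute_start == -1:
--                 minute_start = minute
--     if minute_start == -1:
--         return "There will be no precipitation for the next hour."
--     elif minute_end == -1:
--         return f"Precipitation will begin in {minute_start} minutes."
--     else:
--         return f"Precipitation will begin in {minute_start} minutes and end after {minute_end - minute_start} minutes."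
-- ===== SOURCE B (Python) =====
-- def minute_forecast(minutes):
--     """Helper minutely forecast data analysis function for weather api"""
--     precs = [m['precipitation'] for m in minutes]
--     if not any(precs):
--         return "There will be no precipitation for the next hour."
--     start = 0
--     while precs[start] == 0:
--         start += 1
--     if 0 in precs:
--         end = len(precs) - 1 - precs[::-1].index(0)
--         if end > start:
--             return (f"Precipitation will begin in {start} minutes and end after "
--                     f"{end - start} minutes.")
--     return f"Precipitation will begin in {start} minutes."
-- ===== Notes on version B (the rewrite author's own statement) =====
-- stated objective: alternative
-- what changed: Instead of A's single interleaved two-sentinel state machine over indices, B extracts the precipitation values once, tests any() for the all-dry case, counts leading zeros with a while loop to get the start, and finds the last zero of the whole list as len-1-reversed.index(0), comparing it with start.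
import Mathlib
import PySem

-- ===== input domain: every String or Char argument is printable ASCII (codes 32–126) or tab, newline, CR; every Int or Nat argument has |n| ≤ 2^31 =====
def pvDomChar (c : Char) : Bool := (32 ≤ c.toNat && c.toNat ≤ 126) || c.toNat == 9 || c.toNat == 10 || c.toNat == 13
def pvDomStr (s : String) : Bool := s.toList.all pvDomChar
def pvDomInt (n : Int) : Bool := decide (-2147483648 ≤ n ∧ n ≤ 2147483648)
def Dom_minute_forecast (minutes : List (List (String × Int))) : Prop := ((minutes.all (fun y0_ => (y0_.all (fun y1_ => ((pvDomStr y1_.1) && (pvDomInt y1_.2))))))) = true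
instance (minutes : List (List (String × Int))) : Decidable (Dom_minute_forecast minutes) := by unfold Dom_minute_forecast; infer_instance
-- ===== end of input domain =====

-- B is an alternative decomposition (extract the precipitation list, any() for the all-dry
-- case, leading-zero count for the start, last zero via reversed .index); same O(n) cost.

-- shared accessor: m['precipitation'] on the dict m (Pre_ guarantees the key is present)
def pvPrecip (m : List (String × Int)) : Int :=
  (PySem.Dict.ofList m).getD "precipitation" 0

-- ===== PORT A =====
-- A's loop over range(len(minutes)) with indexing, as a structural fold over the
-- minutes with the same (minute_start, minute_end) state and the same branch order.
def pvScanA : List (List (String × Int)) → Int → Int × Int → Int × Int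
  | [], _, st => st
  | m :: rest, i, (s, e) =>
    pvScanA rest (i + 1)
      (if pvPrecip m = 0 then (s, if s ≠ -1 then i else e)
       else ((if s = -1 then i else s), e))

def minute_forecast (minutes : List (List (String × Int))) : String :=
  let st := pvScanA minutes 0 (-1, -1)
  if st.1 = -1 then "There will be no precipitation for the next hour."
  else if st.2 = -1 then
    "Precipitation will begin in " ++ PySem.Int.toStr st.1 ++ " minutes."
  else
    "Precipitation will begin in " ++ PySem.Int.toStr st.1 ++ " minutes and end after "
      ++ PySem.Int.toStr (st.2 - st.1) ++ " minutes."

-- ===== PORT B =====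
-- 'while precs[start] == 0: start += 1' — the leading-zero count; B only reaches it
-- after any() guaranteed a nonzero entry, where the while loop computes exactly this.
def pvLeadZeros : List Int → Nat
  | [] => 0
  | p :: rest => if p = 0 then pvLeadZeros rest + 1 else 0

def minute_forecast_alt (minutes : List (List (String × Int))) : String :=
  let precs := minutes.map pvPrecip
  -- 'if not any(precs)' (Python int truthiness: any value ≠ 0)
  if precs.any (fun p => decide (p ≠ 0)) = false then
    "There will be no precipitation for the next hour."
  else
    let start : Int := (pvLeadZeros precs : Int)
    if (0 : Int) ∈ precs then
      -- end = len(precs) - 1 - precs[::-1].index(0); precs[::-1] is precs.reverse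
      -- (PySem.List.slice?_none_none_neg_one) and .index is index? (present: 0 ∈ precs)
      let endv : Int := (precs.length : Int) - 1
        - (((PySem.List.index? precs.reverse (0 : Int)).getD 0 : Nat) : Int)
      if endv > start then
        "Precipitation will begin in " ++ PySem.Int.toStr start ++ " minutes and end after "
          ++ PySem.Int.toStr (endv - start) ++ " minutes."
      else "Precipitation will begin in " ++ PySem.Int.toStr start ++ " minutes."
    else "Precipitation will begin in " ++ PySem.Int.toStr start ++ " minutes."

-- ===== PRECONDITION & SPEC =====
-- Pre_ excludes exactly the inputs on which Python A raises KeyError: a minute dict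
-- without the key 'precipitation'.
def Pre_minute_forecast (minutes : List (List (String × Int))) : Prop :=
  ∀ m ∈ minutes, "precipitation" ∈ m.map Prod.fst

instance (minutes : List (List (String × Int))) : Decidable (Pre_minute_forecast minutes) := by
  unfold Pre_minute_forecast; infer_instance

def pvWitness_minute_forecast : (List (List (String × Int))) :=
  [[("precipitation", 0)], [("precipitation", 3)], [("precipitation", 0)]]

def Spec_minute_forecast (minutes : List (List (String × Int))) (out : String) : Prop := out = minute_forecast_alt minutes
instance (minutes : List (List (String × Int))) (out : String) : Decidable (Spec_minute_forecast minutes out) := by unfold Spec_minute_forecast; infer_instance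

-- ===== CLAIM (what is proved, stated in full; the proofs are below) =====
def Claim_equal_minute_forecast : Prop := ∀ (minutes : List (List (String × Int))), Dom_minute_forecast minutes → Pre_minute_forecast minutes → Spec_minute_forecast minutes (minute_forecast minutes)

-- ===== LEMMAS AND PROOFS =====

-- proof-only characterisations of the two programs
-- first index (counting from i) with nonzero precipitation, -1 if none
def pvFirstWet : List (List (String × Int)) → Int → Int
  | [], _ => -1
  | m :: rest, i => if pvPrecip m ≠ 0 then i else pvFirstWet rest (i + 1)

-- last index (counting from i) strictly after s whose value is zero, -1 if none
def pvLZ (s : Int) : List Int → Int → Int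
  | [], _ => -1
  | p :: rest, i => max (if s < i ∧ p = 0 then i else -1) (pvLZ s rest (i + 1))

-- last index (counting from i) whose value is zero, -1 if none
def pvLZ0 : List Int → Int → Int
  | [], _ => -1
  | p :: rest, i => max (if p = 0 then i else -1) (pvLZ0 rest (i + 1))

theorem pvLZ_ge (s : Int) (l : List Int) : ∀ i, -1 ≤ pvLZ s l i := by
  induction l with
  | nil => intro i; simp [pvLZ]
  | cons p rest ih => intro i; have := ih (i + 1); simp only [pvLZ]; split_ifs <;> omega

theorem pvLZ0_ge (l : List Int) : ∀ i, -1 ≤ pvLZ0 l i := by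
  induction l with
  | nil => intro i; simp [pvLZ0]
  | cons p rest ih => intro i; have := ih (i + 1); simp only [pvLZ0]; split_ifs <;> omega

theorem pvFirstWet_ge (l : List (List (String × Int))) :
    ∀ i : Int, pvFirstWet l i ≠ -1 → i ≤ pvFirstWet l i := by
  induction l with
  | nil => intro i h; simp [pvFirstWet] at h
  | cons m rest ih =>
    intro i h
    by_cases hp : pvPrecip m ≠ 0
    · simp [pvFirstWet, hp]
    · simp only [pvFirstWet, if_neg hp] at h ⊢
      have := ih (i + 1) h
      omega

-- started phase of A's scan: once minute_start = s ≥ 0 is fixed and below the running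
-- index, the end-sentinel tracks the last zero after s
theorem pvScanA_started (l : List (List (String × Int))) :
    ∀ (i s e : Int), 0 ≤ s → s < i → -1 ≤ e → e < i →
      pvScanA l i (s, e) = (s, max e (pvLZ s (l.map pvPrecip) i)) := by
  induction l with
  | nil =>
    intro i s e _ _ he hei
    simp only [pvScanA, List.map_nil, pvLZ]
    have h1 : max e (-1 : Int) = e := by omega
    rw [h1]
  | cons m rest ih =>
    intro i s e hs hsi he hei
    by_cases hp : pvPrecip m = 0
    · have hne : s ≠ -1 := by omega
      simp only [pvScanA, List.map_cons, pvLZ, if_pos hp, if_pos hne,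
        if_pos (And.intro hsi hp)]
      rw [ih (i + 1) s i hs (by omega) (by omega) (by omega)]
      have h2 := pvLZ_ge s (rest.map pvPrecip) (i + 1)
      have h3 : max i (pvLZ s (rest.map pvPrecip) (i + 1))
          = max e (max i (pvLZ s (rest.map pvPrecip) (i + 1))) := by omega
      rw [← h3]
    · have hne : ¬ (s = -1) := by omega
      have hcond : ¬ (s < i ∧ pvPrecip m = 0) := fun h => hp h.2
      simp only [pvScanA, List.map_cons, pvLZ, if_neg hp, if_neg hne, if_neg hcond]
      rw [ih (i + 1) s e hs (by omega) he (by omega)]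
      have h2 := pvLZ_ge s (rest.map pvPrecip) (i + 1)
      have h3 : max (-1 : Int) (pvLZ s (rest.map pvPrecip) (i + 1))
          = pvLZ s (rest.map pvPrecip) (i + 1) := by omega
      rw [h3]

-- searching phase: A's scan from (-1, -1) computes the first wet index and the last
-- zero index after it
theorem pvScanA_search (l : List (List (String × Int))) :
    ∀ i : Int, 0 ≤ i →
      pvScanA l i (-1, -1) =
        (pvFirstWet l i,
          if pvFirstWet l i = -1 then -1
          else pvLZ (pvFirstWet l i) (l.map pvPrecip) i) := by
  induction l with
  | nil => intro i _; simp [pvScanA, pvFirstWet]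
  | cons m rest ih =>
    intro i hi
    by_cases hp : pvPrecip m = 0
    · have hp' : ¬ pvPrecip m ≠ 0 := by simpa using hp
      simp only [pvScanA, pvFirstWet, if_pos hp, if_neg hp',
        if_neg (by decide : ¬ ((-1 : Int) ≠ -1))]
      rw [ih (i + 1) (by omega)]
      by_cases hw : pvFirstWet rest (i + 1) = -1
      · simp [hw]
      · have hge : i + 1 ≤ pvFirstWet rest (i + 1) := pvFirstWet_ge rest (i + 1) hw
        have hlz := pvLZ_ge (pvFirstWet rest (i + 1)) (rest.map pvPrecip) (i + 1)
        simp only [List.map_cons, pvLZ, hp, if_neg hw]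
        have hcond : ¬ (pvFirstWet rest (i + 1) < i ∧ True) := by simp; omega
        rw [if_neg hcond]
        have hmx : max (-1 : Int)
            (pvLZ (pvFirstWet rest (i + 1)) (rest.map pvPrecip) (i + 1))
            = pvLZ (pvFirstWet rest (i + 1)) (rest.map pvPrecip) (i + 1) := by omega
        rw [hmx]
    · have hine : i ≠ -1 := by omega
      have hcond : ¬ (i < i ∧ pvPrecip m = 0) := by omega
      simp only [pvScanA, pvFirstWet, if_neg hp, if_pos hp, if_neg hine, List.map_cons,
        pvLZ, if_neg hcond, if_true]
      rw [pvScanA_started rest (i + 1) i (-1) hi (by omega) (by omega) (by omega)]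

-- the first wet index is any() + the leading-zero count
theorem pvFirstWet_eq (l : List (List (String × Int))) :
    ∀ i : Int, pvFirstWet l i =
      if (l.map pvPrecip).any (fun p => decide (p ≠ 0)) = true
      then i + (pvLeadZeros (l.map pvPrecip) : Int) else -1 := by
  induction l with
  | nil => intro i; simp [pvFirstWet]
  | cons m rest ih =>
    intro i
    by_cases hp : pvPrecip m = 0
    · rw [show pvFirstWet (m :: rest) i = pvFirstWet rest (i + 1) from by
        simp [pvFirstWet, hp]]
      rw [ih (i + 1)]
      have hd : decide (pvPrecip m ≠ 0) = false := by simp [hp]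
      rw [List.map_cons, List.any_cons, hd]
      rw [show pvLeadZeros (pvPrecip m :: rest.map pvPrecip)
          = pvLeadZeros (rest.map pvPrecip) + 1 from by simp [pvLeadZeros, hp]]
      simp only [Bool.false_or]
      split_ifs
      · push_cast; ring
      · rfl
    · simp [pvFirstWet, pvLeadZeros, hp]

-- restricting the last zero to indices after s keeps it iff it lies after s
theorem pvLZ_eq_LZ0 (xs : List Int) :
    ∀ (i s : Int), -1 ≤ s →
      pvLZ s xs i = if s < pvLZ0 xs i then pvLZ0 xs i else -1 := by
  induction xs with
  | nil => intro i s hs; simp only [pvLZ, pvLZ0]; split_ifs <;> omega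
  | cons p rest ih =>
    intro i s hs
    have h0 := pvLZ0_ge rest (i + 1)
    have h1 := pvLZ_ge s rest (i + 1)
    simp only [pvLZ, pvLZ0]
    rw [ih (i + 1) s hs]
    split_ifs <;> omega

-- index? of a member is in range
theorem pvIndex_lt (xs : List Int) (h : (0 : Int) ∈ xs) :
    ∃ k, PySem.List.index? xs (0 : Int) = some k ∧ k < xs.length := by
  have hs : (PySem.List.index? xs (0 : Int)).isSome := by
    rw [PySem.List.index?_isSome_iff]; exact h
  obtain ⟨k, hk⟩ := Option.isSome_iff_exists.mp hs
  obtain ⟨hlt, -, -⟩ := PySem.List.getElem_of_index?_eq_some hk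
  exact ⟨k, hk, hlt⟩

-- the overall last zero index equals len - 1 - reversed-first-zero index
theorem pvLZ0_eq_revIndex (xs : List Int) :
    ∀ i : Int, 0 ≤ i →
      pvLZ0 xs i =
        if (0 : Int) ∈ xs then
          i + ((xs.length : Int) - 1
            - (((PySem.List.index? xs.reverse (0 : Int)).getD 0 : Nat) : Int))
        else -1 := by
  induction xs with
  | nil => intro i _; simp [pvLZ0]
  | cons p rest ih =>
    intro i hi
    simp only [pvLZ0, List.reverse_cons]
    rw [ih (i + 1) (by omega)]
    by_cases hr : (0 : Int) ∈ rest
    · have hmem : (0 : Int) ∈ rest.reverse := by simpa using hr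
      rw [PySem.List.index?_append_of_mem [p] hmem]
      obtain ⟨k, hk, hklt⟩ := pvIndex_lt rest.reverse hmem
      rw [hk]
      simp only [Option.getD_some, List.length_cons, List.mem_cons, hr, or_true,
        if_pos, if_pos hr]
      have hklt' : (k : Int) < rest.length := by
        simpa using (Int.ofNat_lt.mpr hklt)
      push_cast
      split_ifs <;> omega
    · have hmem : (0 : Int) ∉ rest.reverse := by simpa using hr
      by_cases hp : p = 0
      · subst hp
        rw [PySem.List.index?_append_singleton_self rest.reverse (0 : Int) hmem]
        simp only [Option.getD_some, List.length_reverse, List.length_cons,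
          List.mem_cons, true_or, if_pos, if_neg hr]
        push_cast
        omega
      · have hnm : (0 : Int) ∉ p :: rest := by
          simp only [List.mem_cons, not_or]
          exact ⟨fun h => hp h.symm, hr⟩
        simp only [if_neg hnm, if_neg hr, if_neg hp]
        omega

-- ===== VERDICT (by name: the statement is the Claim_ definition above) =====
theorem minute_forecast_spec : Claim_equal_minute_forecast := by
  intro minutes _ _
  unfold Spec_minute_forecast minute_forecast minute_forecast_alt
  rw [pvScanA_search minutes 0 (by omega), pvFirstWet_eq minutes 0]
  by_cases ha : ((minutes.map pvPrecip).any fun p => decide (p ≠ 0)) = true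
  · have hall : ¬ (∀ x ∈ minutes, pvPrecip x = 0) := by simpa using ha
    rw [if_pos ha]
    simp only [zero_add]
    have hL0 : (0 : Int) ≤ (pvLeadZeros (minutes.map pvPrecip) : Int) :=
      Int.natCast_nonneg _
    rw [pvLZ_eq_LZ0 (minutes.map pvPrecip) 0
        ((pvLeadZeros (minutes.map pvPrecip) : Int)) (by omega),
      pvLZ0_eq_revIndex (minutes.map pvPrecip) 0 le_rfl]
    simp only [zero_add]
    have hLne : ((pvLeadZeros (minutes.map pvPrecip) : Int)) ≠ -1 := by omega
    by_cases hm : (0 : Int) ∈ minutes.map pvPrecip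
    · rw [if_pos hm]
      by_cases hlt : (pvLeadZeros (minutes.map pvPrecip) : Int)
          < (minutes.length : Int) - 1
            - (((List.idxOf? (0 : Int) (minutes.map pvPrecip).reverse).getD 0 : Nat) : Int)
      · have hEne : (minutes.length : Int) - 1
            - (((List.idxOf? (0 : Int) (minutes.map pvPrecip).reverse).getD 0 : Nat) : Int)
            ≠ -1 := by omega
        simp [ha, hm, hlt, hLne, hEne, hall]
      · simp [ha, hm, hlt, hLne, hall]
    · rw [if_neg hm]
      have hnl : ¬ ((pvLeadZeros (minutes.map pvPrecip) : Int) < -1) := by omega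
      simp [ha, hm, hLne, hnl, hall]
  · have hall : ∀ x ∈ minutes, pvPrecip x = 0 := by
      intro x hx
      by_contra hc
      exact ha (List.any_eq_true.mpr ⟨pvPrecip x, List.mem_map_of_mem hx, by simpa using hc⟩)
    rw [if_neg ha]
    simp
    intro x hx hc
    exact absurd (hall x hx) hc
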